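-- pv_equiv track=rewrite | github.com/Mat-gyver/trotanalyser | trotanalyser-app/backend/open_pmu/import_trot_runners.py | score_participant_dict
-- ===== SOURCE A (Python) =====
-- def score_participant_dict(d):
--     if not isinstance(d, dict):
--         return 0
--     score = 0
--     for key in ["nom", "numPmu", "age", "sexe", "driver", "entraineur", "musique", "ferrure"]:
--         if key in d:
--             score += 2
--     for key in ["cheval", "jockey", "proprietaire", "dernieresPerformances"]:
--         if key in d:
--             score += 1
--     return score
-- ===== SOURCE B (Python) =====
-- _WEIGHTS = {"nom": 2, "numPmu": 2, "age": 2, "sexe": 2, "driver": 2,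
--             "entraineur": 2, "musique": 2, "ferrure": 2,
--             "cheval": 1, "jockey": 1, "proprietaire": 1,
--             "dernieresPerformances": 1}
--
--
-- def score_participant_dict(d):
--     if not isinstance(d, dict):
--         return 0
--     return sum(_WEIGHTS.get(k, 0) for k in d)
-- ===== Notes on version B (the rewrite author's own statement) =====
-- stated objective: idiomatic
-- what changed: Instead of scanning two fixed key lists and testing membership in d, B builds one weight table and makes a single pass over d's own keys, summing looked-up weights.
import Mathlib
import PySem

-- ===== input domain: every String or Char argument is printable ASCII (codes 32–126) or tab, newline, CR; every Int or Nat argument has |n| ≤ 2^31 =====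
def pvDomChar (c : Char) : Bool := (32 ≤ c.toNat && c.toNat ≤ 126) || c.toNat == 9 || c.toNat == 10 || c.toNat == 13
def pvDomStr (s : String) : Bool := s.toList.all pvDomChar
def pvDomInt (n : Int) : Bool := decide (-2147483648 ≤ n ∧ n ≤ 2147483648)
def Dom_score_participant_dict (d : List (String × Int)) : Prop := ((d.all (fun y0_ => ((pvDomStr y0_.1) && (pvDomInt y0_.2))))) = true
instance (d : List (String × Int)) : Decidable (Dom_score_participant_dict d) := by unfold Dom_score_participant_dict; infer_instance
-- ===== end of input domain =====

-- B replaces A's two scans over fixed key lists by one pass over d's keys with a weight table (idiomatic).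
-- The isinstance guard is vacuous under the typed signature and is not ported.

-- ===== PORT A =====
def score_participant_dict (d : List (String × Int)) : Int :=
  let score : Int := 0
  let score := ["nom", "numPmu", "age", "sexe", "driver", "entraineur", "musique", "ferrure"].foldl
    (fun s key => if d.any (fun kv => kv.1 == key) then s + 2 else s) score
  let score := ["cheval", "jockey", "proprietaire", "dernieresPerformances"].foldl
    (fun s key => if d.any (fun kv => kv.1 == key) then s + 1 else s) score
  score

-- ===== PORT B =====
def pvWeights : List (String × Int) :=
  [("nom", 2), ("numPmu", 2), ("age", 2), ("sexe", 2), ("driver", 2),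
   ("entraineur", 2), ("musique", 2), ("ferrure", 2),
   ("cheval", 1), ("jockey", 1), ("proprietaire", 1), ("dernieresPerformances", 1)]

-- dict.get(k, 0): first match in the association list, default 0
def pvWGet : List (String × Int) → String → Int
  | [], _ => 0
  | (k, w) :: rest, x => if k == x then w else pvWGet rest x

def score_participant_dict_alt (d : List (String × Int)) : Int :=
  d.foldl (fun s kv => s + pvWGet pvWeights kv.1) 0

-- ===== PRECONDITION & SPEC =====
-- Pre_ excludes association lists with duplicate keys: they do not represent a Python dict
-- (A's argument is a dict, whose keys are unique), so neither behaviour there is A's.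
def Pre_score_participant_dict (d : List (String × Int)) : Prop := (d.map Prod.fst).Nodup
instance (d : List (String × Int)) : Decidable (Pre_score_participant_dict d) := by
  unfold Pre_score_participant_dict; infer_instance

def pvWitness_score_participant_dict : (List (String × Int)) := [("nom", 1), ("cheval", 3), ("x", 0)]

def Spec_score_participant_dict (d : List (String × Int)) (out : Int) : Prop := out = score_participant_dict_alt d
instance (d : List (String × Int)) (out : Int) : Decidable (Spec_score_participant_dict d out) := by unfold Spec_score_participant_dict; infer_instance

-- ===== CLAIM (what is proved, stated in full; the proofs are below) =====
def Claim_equal_score_participant_dict : Prop := ∀ (d : List (String × Int)), Dom_score_participant_dict d → Pre_score_participant_dict d → Spec_score_participant_dict d (score_participant_dict d)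

-- ===== LEMMAS AND PROOFS =====

-- A's two loops over the literal key lists are, definitionally, one fold over pvWeights.
lemma A_as_weight_fold (d : List (String × Int)) :
    score_participant_dict d =
      pvWeights.foldl (fun s kw => if d.any (fun kv => kv.1 == kw.1) then s + kw.2 else s) 0 := rfl

lemma pvWGet_of_not_mem (W : List (String × Int)) (x : String) (h : x ∉ W.map Prod.fst) :
    pvWGet W x = 0 := by
  induction W with
  | nil => rfl
  | cons kw rest ih =>
    obtain ⟨k, w⟩ := kw
    simp only [List.map_cons, List.mem_cons, not_or] at h
    simp only [pvWGet]
    rw [if_neg (by simpa using fun hkx => h.1 hkx.symm), ih h.2]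

lemma sum_if_mem (l : List String) (hl : l.Nodup) (k : String) (w : Int) :
    (l.map (fun x => if x = k then w else 0)).sum = if k ∈ l then w else 0 := by
  induction l with
  | nil => simp
  | cons a l ih =>
    have hnd := (List.nodup_cons.mp hl)
    by_cases hak : a = k
    · subst hak
      simp [ih hnd.2, hnd.1]
    · simp only [List.map_cons, List.sum_cons, if_neg hak, ih hnd.2, List.mem_cons]
      simp [Ne.symm hak]

lemma foldl_if_eq_sum (W : List (String × Int)) (P : String → Bool) (s : Int) :
    W.foldl (fun s kw => if P kw.1 then s + kw.2 else s) s
      = s + (W.map (fun kw => if P kw.1 then kw.2 else 0)).sum := by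
  induction W generalizing s with
  | nil => simp
  | cons kw rest ih =>
    simp only [List.foldl_cons, List.map_cons, List.sum_cons, ih]
    by_cases h : P kw.1 <;> simp [h] <;> ring

lemma sum_map_add_int {α : Type} (l : List α) (f g : α → Int) :
    (l.map (fun x => f x + g x)).sum = (l.map f).sum + (l.map g).sum := by
  induction l with
  | nil => simp
  | cons a l ih => simp [ih]; ring

lemma any_eq_mem (L : List (String × Int)) (k : String) :
    L.any (fun kv => kv.1 == k) = decide (k ∈ L.map Prod.fst) := by
  induction L with
  | nil => simp
  | cons kv rest ih =>
    by_cases h : kv.1 = k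
    · simp [h]
    · have h2 : ¬ k = kv.1 := fun e => h e.symm
      by_cases hm : k ∈ List.map Prod.fst rest <;>
        simp [List.mem_cons, h, h2, hm, ih]

lemma key_sum_lemma (W L : List (String × Int))
    (hW : (W.map Prod.fst).Nodup) (hL : (L.map Prod.fst).Nodup) :
    (L.map (fun kv => pvWGet W kv.1)).sum
      = (W.map (fun kw => if L.any (fun kv => kv.1 == kw.1) then kw.2 else 0)).sum := by
  induction W with
  | nil => simp [pvWGet]
  | cons kw W' ih =>
    obtain ⟨k, w⟩ := kw
    rw [List.map_cons] at hW
    have hkW' : k ∉ W'.map Prod.fst := (List.nodup_cons.mp hW).1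
    have hW' : (W'.map Prod.fst).Nodup := (List.nodup_cons.mp hW).2
    have hpt : (L.map (fun kv => pvWGet ((k, w) :: W') kv.1))
        = L.map (fun kv => pvWGet W' kv.1 + (if kv.1 = k then w else 0)) := by
      apply List.map_congr_left
      intro kv _
      by_cases hk : kv.1 = k
      · simp [pvWGet, hk, pvWGet_of_not_mem W' k hkW']
      · have h2 : ¬ k = kv.1 := fun e => hk e.symm
        simp [pvWGet, hk, h2]
    rw [hpt, sum_map_add_int]
    have h2 : (L.map (fun kv => if kv.1 = k then w else 0)).sum = if k ∈ L.map Prod.fst then w else 0 := by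
      rw [← sum_if_mem (L.map Prod.fst) hL k w, List.map_map]
      rfl
    rw [h2, ih hW']
    simp only [List.map_cons, List.sum_cons, any_eq_mem]
    by_cases hm : k ∈ L.map Prod.fst <;> simp [hm] <;> ring

-- ===== VERDICT (by name: the statement is the Claim_ definition above) =====
theorem score_participant_dict_spec : Claim_equal_score_participant_dict := by
  intro d _ hpre
  unfold Spec_score_participant_dict score_participant_dict_alt
  rw [A_as_weight_fold,
    foldl_if_eq_sum pvWeights (fun key => d.any (fun kv => kv.1 == key)) 0,
    PySem.List.foldl_add]
  have hW : (pvWeights.map Prod.fst).Nodup := by decide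
  rw [key_sum_lemma pvWeights d hW hpre]
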